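-- pv_equiv track=rewrite | github.com/26516515111/Project | rag_app/kg_pipeline/graph.py | _select_steps
-- ===== SOURCE A (Python) =====
-- STEP_SEQUENCE = [1, 2, 3, 4, 5, 6, 7]
--
-- def _select_steps(start: int, end: int, only: int | None, skip_neo4j: bool) -> list[int]:
--     if only is not None:
--         steps = [step for step in STEP_SEQUENCE if step == only]
--     else:
--         steps = [step for step in STEP_SEQUENCE if start <= step <= end]
--     if skip_neo4j:
--         steps = [step for step in steps if step != 5]
--     return steps
-- ===== SOURCE B (Python) =====
-- STEP_SEQUENCE = [1, 2, 3, 4, 5, 6, 7]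
--
-- def _select_steps(start: int, end: int, only: int | None, skip_neo4j: bool) -> list[int]:
--     if only is not None:
--         steps = [only] if 1 <= only <= 7 else []
--     else:
--         steps = list(range(max(start, 1), min(end, 7) + 1))
--     if skip_neo4j and 5 in steps:
--         steps.remove(5)
--     return steps
-- ===== Notes on version B (the rewrite author's own statement) =====
-- stated objective: simpler
-- what changed: replaces the element-by-element filters over the fixed STEP_SEQUENCE list with closed-form construction: a clamped contiguous range for the start/end branch, a direct singleton test for the only branch, and a single remove(5) instead of a final filter pass
import Mathlib
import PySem

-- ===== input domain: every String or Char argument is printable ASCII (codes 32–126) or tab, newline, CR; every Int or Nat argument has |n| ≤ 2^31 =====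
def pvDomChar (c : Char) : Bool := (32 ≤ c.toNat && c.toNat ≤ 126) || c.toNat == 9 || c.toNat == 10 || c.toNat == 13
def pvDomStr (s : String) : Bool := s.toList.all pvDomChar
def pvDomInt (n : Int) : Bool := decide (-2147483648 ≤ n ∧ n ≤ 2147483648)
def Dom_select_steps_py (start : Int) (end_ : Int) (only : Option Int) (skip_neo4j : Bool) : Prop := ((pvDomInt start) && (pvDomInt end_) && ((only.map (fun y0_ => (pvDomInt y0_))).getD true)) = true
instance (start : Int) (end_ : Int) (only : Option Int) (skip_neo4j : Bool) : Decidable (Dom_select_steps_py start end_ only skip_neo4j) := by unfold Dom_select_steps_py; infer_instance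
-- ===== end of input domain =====

-- ===== PORT A =====
-- B replaces the per-element filters of the fixed 7-element list with closed-form
-- clamped-range / singleton construction; objective: simpler.
def select_steps_py (start : Int) (end_ : Int) (only : Option Int) (skip_neo4j : Bool) : List Int :=
  let steps : List Int :=
    match only with
    | some o => ([1, 2, 3, 4, 5, 6, 7] : List Int).filter (fun step => step == o)
    | none => ([1, 2, 3, 4, 5, 6, 7] : List Int).filter (fun step => start ≤ step && step ≤ end_)
  if skip_neo4j then steps.filter (fun step => step != 5) else steps

-- ===== PORT B =====
def select_steps_py_alt (start : Int) (end_ : Int) (only : Option Int) (skip_neo4j : Bool) : List Int :=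
  let steps : List Int :=
    match only with
    | some o => if 1 ≤ o ∧ o ≤ 7 then [o] else []
    | none => PySem.List.pyRange (max start 1) (min end_ 7 + 1) 1
  if skip_neo4j && steps.contains 5 then (PySem.List.remove? steps 5).getD steps else steps

-- ===== PRECONDITION & SPEC =====
def Spec_select_steps_py (start : Int) (end_ : Int) (only : Option Int) (skip_neo4j : Bool) (out : List Int) : Prop := out = select_steps_py_alt start end_ only skip_neo4j
instance (start : Int) (end_ : Int) (only : Option Int) (skip_neo4j : Bool) (out : List Int) : Decidable (Spec_select_steps_py start end_ only skip_neo4j out) := by unfold Spec_select_steps_py; infer_instance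

-- ===== CLAIM (what is proved, stated in full; the proofs are below) =====
def Claim_equal_select_steps_py : Prop := ∀ (start : Int) (end_ : Int) (only : Option Int) (skip_neo4j : Bool), Dom_select_steps_py start end_ only skip_neo4j → Spec_select_steps_py start end_ only skip_neo4j (select_steps_py start end_ only skip_neo4j)

-- ===== LEMMAS AND PROOFS =====

-- The `only` branch: filtering the fixed list by equality gives the singleton iff 1 ≤ o ≤ 7.
lemma filter_eq_singleton (o : Int) :
    ([1, 2, 3, 4, 5, 6, 7] : List Int).filter (fun step => step == o)
      = if 1 ≤ o ∧ o ≤ 7 then [o] else [] := by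
  rcases eq_or_ne o 1 with rfl | h1; · decide
  rcases eq_or_ne o 2 with rfl | h2; · decide
  rcases eq_or_ne o 3 with rfl | h3; · decide
  rcases eq_or_ne o 4 with rfl | h4; · decide
  rcases eq_or_ne o 5 with rfl | h5; · decide
  rcases eq_or_ne o 6 with rfl | h6; · decide
  rcases eq_or_ne o 7 with rfl | h7; · decide
  have hn : ¬(1 ≤ o ∧ o ≤ 7) := by omega
  rw [if_neg hn, List.filter_eq_nil_iff]
  intro x hx
  fin_cases hx <;> simp <;> omega

-- The range branch: the filter by start ≤ step ≤ end_ is the clamped contiguous range.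
lemma filter_eq_range (start end_ : Int) :
    ([1, 2, 3, 4, 5, 6, 7] : List Int).filter (fun step => start ≤ step && step ≤ end_)
      = PySem.List.pyRange (max start 1) (min end_ 7 + 1) 1 := by
  have e : ([1, 2, 3, 4, 5, 6, 7] : List Int).filter (fun step => start ≤ step && step ≤ end_)
      = ([1, 2, 3, 4, 5, 6, 7] : List Int).filter
          (fun step => max start 1 ≤ step && step ≤ min end_ 7) := by
    apply List.filter_congr
    intro x hx
    fin_cases hx <;> simp
  rw [e]
  have ha1 : 1 ≤ max start 1 := le_max_right _ _
  have hb7 : min end_ 7 ≤ 7 := min_le_right _ _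
  by_cases ha : max start 1 ≤ 8
  · by_cases hb : 0 ≤ min end_ 7
    · set a := max start 1 with hA
      set b := min end_ 7 with hB
      clear_value a b
      interval_cases a <;> interval_cases b <;> decide
    · have hb' : min end_ 7 + 1 ≤ max start 1 := by omega
      have h1 : ([1, 2, 3, 4, 5, 6, 7] : List Int).filter
          (fun step => max start 1 ≤ step && step ≤ min end_ 7) = [] := by
        rw [List.filter_eq_nil_iff]
        intro x hx
        fin_cases hx <;> simp <;> omega
      rw [h1, PySem.List.pyRange_one]
      have : (min end_ 7 + 1 - max start 1).toNat = 0 := by omega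
      rw [this]
      simp
  · have h1 : ([1, 2, 3, 4, 5, 6, 7] : List Int).filter
        (fun step => max start 1 ≤ step && step ≤ min end_ 7) = [] := by
      rw [List.filter_eq_nil_iff]
      intro x hx
      fin_cases hx <;> simp <;> omega
    rw [h1, PySem.List.pyRange_one]
    have : (min end_ 7 + 1 - max start 1).toNat = 0 := by omega
    rw [this]
    simp

-- Dropping 5: A's final filter equals B's guarded remove(5) on lists without duplicate 5s.
lemma drop5_eq (l : List Int) (hl : l.Pairwise (· < ·)) :
    l.filter (fun step => step != 5)
      = if l.contains 5 then (PySem.List.remove? l 5).getD l else l := by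
  by_cases h5 : (5 : Int) ∈ l
  · rw [if_pos (by simpa using h5)]
    induction l with
    | nil => simp at h5
    | cons x xs ih =>
      rcases List.pairwise_cons.mp hl with ⟨hx, hxs⟩
      by_cases hx5 : x = 5
      · subst hx5
        have hnot : (5 : Int) ∉ xs := fun hm => lt_irrefl 5 (hx 5 hm)
        simp [PySem.List.remove?, List.idxOf?_cons]
        intro a ha
        have := hx a ha; omega
      · have h5' : (5 : Int) ∈ xs := by
          rcases List.mem_cons.mp h5 with h | h
          · exact absurd h.symm hx5
          · exact h
        have hrec := ih hxs h5'
        rcases hk : List.idxOf? (5 : Int) xs with _ | k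
        · exact absurd (List.idxOf?_eq_none_iff.mp hk) (by simpa using h5')
        · simp only [PySem.List.remove?, List.idxOf?_cons, hk] at hrec ⊢
          have hxb : (x == (5 : Int)) = false := by simpa using hx5
          simp only [hxb, Option.map_some, Option.getD_some] at hrec ⊢
          rw [List.filter_cons_of_pos (by simpa using hx5), hrec]
          simp
  · rw [if_neg (by simpa using h5)]
    exact List.filter_eq_self.mpr fun a ha => by
      simp; rintro rfl; exact h5 ha

-- ===== VERDICT (by name: the statement is the Claim_ definition above) =====
theorem select_steps_py_spec : Claim_equal_select_steps_py := by
  intro start end_ only skip_neo4j _hdom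
  unfold Spec_select_steps_py select_steps_py select_steps_py_alt
  rcases only with _ | o
  · simp only [filter_eq_range]
    rcases skip_neo4j with _ | _
    · simp
    · simp only [Bool.true_and, if_true]
      rw [drop5_eq _ (PySem.List.pairwise_lt_pyRange_one _ _)]
  · simp only [filter_eq_singleton]
    rcases skip_neo4j with _ | _
    · simp
    · simp only [Bool.true_and, if_true]
      rw [drop5_eq _ (by split <;> simp)]
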